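-- pv_equiv track=rewrite | github.com/HannahHatem/machine-learning | introduction-to-python/bracket_sequence.py | check_bracket_sequence
-- ===== SOURCE A (Python) =====
-- def check_bracket_sequence (sequence: str)-> bool:
--
--     '''
--     This function takes a sequence of brackets and return true if the sequence can be fixed within at most one step
--     and return false otherwise
--     '''
--     can_be_fixed:bool
--     #TODO: ADD YOUR CODE HERE
--     can_be_fixed  = False
--     dict = {}
--     #if sequence == "":
--     #    return False
--
--     count = 0
--
--     if (len(sequence) %2) !=0:
--         can_be_fixed = False
--     else:
--         for i in sequence:
--             if i == ")":
--                 count = count -1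
--             else:
--                 count = count + 1
--             if count < -1:
--                 break
--
--         if count == 0:
--             return True
--         elif count == -1 or count == 1:
--             return True
--         else:
--             return False
--
--     return can_be_fixed
-- ===== SOURCE B (Python) =====
-- def check_bracket_sequence(sequence: str) -> bool:
--     if len(sequence) % 2 != 0:
--         return False
--     if not sequence:
--         return True
--     prefixes = []
--     total = 0
--     for ch in sequence:
--         total += -1 if ch == ')' else 1
--         prefixes.append(total)
--     return min(prefixes) >= -1 and prefixes[-1] == 0
-- ===== Notes on version B (the rewrite author's own statement) =====
-- stated objective: simpler
-- what changed: Replaces A's early-breaking scan with a count-state machine plus the count in {-1,0,1} return chain by building the full prefix-balance table and returning a single aggregate condition: min(prefixes) >= -1 and prefixes[-1] == 0 (with explicit odd-length and empty guards).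
import Mathlib
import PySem

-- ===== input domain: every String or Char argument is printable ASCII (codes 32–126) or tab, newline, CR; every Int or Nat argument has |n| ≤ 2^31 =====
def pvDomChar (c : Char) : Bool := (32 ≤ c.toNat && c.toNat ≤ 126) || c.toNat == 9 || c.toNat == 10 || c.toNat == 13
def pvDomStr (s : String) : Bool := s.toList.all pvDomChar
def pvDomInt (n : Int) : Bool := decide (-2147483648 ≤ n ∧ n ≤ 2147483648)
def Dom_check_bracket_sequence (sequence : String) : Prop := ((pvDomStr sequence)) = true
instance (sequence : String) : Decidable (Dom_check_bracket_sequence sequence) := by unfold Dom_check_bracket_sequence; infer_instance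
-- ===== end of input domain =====

-- B replaces A's early-breaking counter scan with a prefix-balance table and one aggregate test; objective: simpler.

-- ===== PORT A =====
-- A's for-loop over the characters, carrying `count`, with the `break` on count < -1.
def pvLoopA : List Char → Int → Int
  | [], count => count
  | i :: rest, count =>
    let count' := if i = ')' then count - 1 else count + 1
    if count' < -1 then count' else pvLoopA rest count'

def check_bracket_sequence (sequence : String) : Bool :=
  if sequence.toList.length % 2 ≠ 0 then false
  else
    let count := pvLoopA sequence.toList 0
    if count == 0 then true
    else if count == -1 || count == 1 then true
    else false

-- ===== PORT B =====
-- B's loop building the list of prefix balances (the `prefixes` table).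
def pvScanB : List Char → Int → List Int
  | [], _ => []
  | ch :: rest, total =>
    let total' := total + (if ch = ')' then -1 else 1)
    total' :: pvScanB rest total'

def check_bracket_sequence_alt (sequence : String) : Bool :=
  if sequence.toList.length % 2 ≠ 0 then false
  else if sequence.toList.isEmpty then true
  else
    let prefixes := pvScanB sequence.toList 0
    match PySem.List.min? prefixes (fun x => x), PySem.List.pyGet? prefixes (-1) with
    | some m, some lastv => decide (-1 ≤ m) && (lastv == 0)
    | _, _ => false

-- ===== PRECONDITION & SPEC =====
def Spec_check_bracket_sequence (sequence : String) (out : Bool) : Prop := out = check_bracket_sequence_alt sequence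
instance (sequence : String) (out : Bool) : Decidable (Spec_check_bracket_sequence sequence out) := by unfold Spec_check_bracket_sequence; infer_instance

-- ===== CLAIM (what is proved, stated in full; the proofs are below) =====
def Claim_equal_check_bracket_sequence : Prop := ∀ (sequence : String), Dom_check_bracket_sequence sequence → Spec_check_bracket_sequence sequence (check_bracket_sequence sequence)

-- ===== LEMMAS AND PROOFS =====

theorem pvScanB_cons (x : Char) (xs : List Char) (t : Int) :
    pvScanB (x :: xs) t = (t + (if x = ')' then -1 else 1)) :: pvScanB xs (t + (if x = ')' then -1 else 1)) := rfl

theorem pvScanB_ne_nil (x : Char) (xs : List Char) (t : Int) : pvScanB (x :: xs) t ≠ [] := by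
  simp [pvScanB_cons]

-- If every prefix balance stays ≥ -1, A's loop never breaks and returns the last balance.
theorem pvLoopA_of_all_ge (xs : List Char) (t : Int)
    (h : ∀ p ∈ pvScanB xs t, -1 ≤ p) : pvLoopA xs t = (pvScanB xs t).getLastD t := by
  induction xs generalizing t with
  | nil => rfl
  | cons x rest ih =>
    have hx : -1 ≤ t + (if x = ')' then -1 else 1) := h _ (by rw [pvScanB_cons]; exact List.mem_cons_self)
    have hrest : ∀ p ∈ pvScanB rest (t + (if x = ')' then -1 else 1)), -1 ≤ p := by
      intro p hp
      exact h p (by rw [pvScanB_cons]; exact List.mem_cons_of_mem _ hp)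
    have heq : (if x = ')' then t - 1 else t + 1) = t + (if x = ')' then -1 else 1) := by
      split_ifs <;> omega
    simp only [pvLoopA, pvScanB_cons, List.getLastD_cons]
    rw [if_neg (by omega : ¬ ((if x = ')' then t - 1 else t + 1) < -1)), heq]
    exact ih _ hrest

-- If some prefix balance drops below -1, A's loop breaks and returns a value < -1.
theorem pvLoopA_of_exists_lt (xs : List Char) (t : Int)
    (h : ∃ p ∈ pvScanB xs t, p < -1) : pvLoopA xs t < -1 := by
  induction xs generalizing t with
  | nil => simp [pvScanB] at h
  | cons x rest ih =>
    have heq : (if x = ')' then t - 1 else t + 1) = t + (if x = ')' then -1 else 1) := by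
      split_ifs <;> omega
    simp only [pvLoopA]
    by_cases hb : (if x = ')' then t - 1 else t + 1) < -1
    · rw [if_pos hb]; exact hb
    · rw [if_neg hb, heq]
      apply ih
      rcases h with ⟨p, hp, hplt⟩
      rw [pvScanB_cons] at hp
      rcases List.mem_cons.mp hp with h1 | h2
      · exfalso; rw [heq] at hb; omega
      · exact ⟨p, h2, hplt⟩

-- The last prefix balance has the parity of the length.
theorem pvScanB_last_parity (xs : List Char) (t : Int) :
    ((pvScanB xs t).getLastD t - t - (xs.length : Int)) % 2 = 0 := by
  induction xs generalizing t with
  | nil => simp [pvScanB]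
  | cons x rest ih =>
    rw [pvScanB_cons, List.getLastD_cons]
    have h := ih (t + (if x = ')' then -1 else 1))
    simp only [List.length_cons]
    push_cast at *
    split_ifs at * <;> omega

theorem check_bracket_sequence_eq (sequence : String) :
    check_bracket_sequence sequence = check_bracket_sequence_alt sequence := by
  unfold check_bracket_sequence check_bracket_sequence_alt
  by_cases hodd : sequence.toList.length % 2 ≠ 0
  · rw [if_pos hodd, if_pos hodd]
  · rw [if_neg hodd, if_neg hodd]
    rcases hl : sequence.toList with _ | ⟨x, rest⟩
    · simp [pvLoopA]
    · simp only [List.isEmpty_cons, Bool.false_eq_true, if_false]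
      have hne := pvScanB_ne_nil x rest 0
      have hpar := pvScanB_last_parity (x :: rest) 0
      rw [hl] at hodd
      -- reduce B's match: min? is some, prefixes[-1] is the last balance
      rcases hm : PySem.List.min? (pvScanB (x :: rest) 0) (fun v => v) with _ | m
      · exact absurd ((PySem.List.min?_eq_none_iff _ _).mp hm) hne
      have hget : PySem.List.pyGet? (pvScanB (x :: rest) 0) (-1)
          = some ((pvScanB (x :: rest) 0).getLastD 0) := by
        rw [PySem.List.pyGet?_neg_one]
        rcases hS : pvScanB (x :: rest) 0 with _ | ⟨a, P'⟩
        · exact absurd hS hne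
        · simp [List.getLast?_eq_some_getLast, List.getLastD_eq_getLast?]
      rw [hget]
      show (if (pvLoopA (x :: rest) 0 == 0) = true then true
          else if (pvLoopA (x :: rest) 0 == -1 || pvLoopA (x :: rest) 0 == 1) = true then true
          else false)
        = (decide (-1 ≤ m) && ((pvScanB (x :: rest) 0).getLastD 0 == 0))
      by_cases hall : ∀ p ∈ pvScanB (x :: rest) 0, -1 ≤ p
      · have hloop := pvLoopA_of_all_ge (x :: rest) 0 hall
        have hmge : -1 ≤ m := hall m (PySem.List.min?_mem hm)
        simp only [decide_eq_true hmge, Bool.true_and, hloop]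
        set lastv := (pvScanB (x :: rest) 0).getLastD 0 with hlv
        simp only [List.length_cons] at hodd hpar
        by_cases h0 : lastv = 0
        · rw [h0]; simp
        · have h1 : lastv ≠ -1 := by intro h; rw [h] at hpar; omega
          have h2 : lastv ≠ 1 := by intro h; rw [h] at hpar; omega
          simp [h0, h1, h2]
      · push Not at hall
        have hloop := pvLoopA_of_exists_lt (x :: rest) 0 (by
          rcases hall with ⟨p, hp, hlt⟩; exact ⟨p, hp, by omega⟩)
        rcases hall with ⟨p, hp, hplt⟩
        have hmin := PySem.List.min?_isMin hm p hp
        have hmlt : ¬ (-1 ≤ m) := by simp only at hmin; omega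
        have h0 : pvLoopA (x :: rest) 0 ≠ 0 := by omega
        have h1 : pvLoopA (x :: rest) 0 ≠ -1 := by omega
        have h2 : pvLoopA (x :: rest) 0 ≠ 1 := by omega
        simp [h0, h1, h2, hmlt]

-- ===== VERDICT (by name: the statement is the Claim_ definition above) =====
theorem check_bracket_sequence_spec : Claim_equal_check_bracket_sequence := by
  intro sequence _
  unfold Spec_check_bracket_sequence
  exact check_bracket_sequence_eq sequence
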